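-- pv_equiv track=rewrite | github.com/JinnZ2/Rosetta-Shape-Core | examples/octahedral_coupling_audit.py | build_parity_matrix
-- ===== SOURCE A (Python) =====
-- from typing import Dict, List, Optional, Tuple
--
-- def build_parity_matrix(relations: List[Dict], factor_base: List[int]) -> List[List[int]]:
--     """Build GF(2) parity matrix."""
--     prime_idx = {p: i for i, p in enumerate(factor_base)}
--     M = []
--     for rel in relations:
--         row = [0] * len(factor_base)
--         for p, count in rel["exp"].items():
--             if p in prime_idx:
--                 row[prime_idx[p]] = count % 2
--         M.append(row)
--     return M
-- ===== SOURCE B (Python) =====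
-- def build_parity_matrix(relations, factor_base):
--     """Build GF(2) parity matrix by gathering each relation's exponent parity over the factor base."""
--     return [[rel["exp"].get(p, 0) % 2 for p in factor_base] for rel in relations]
-- ===== Notes on version B (the rewrite author's own statement) =====
-- stated objective: idiomatic
-- what changed: B drops the prime->index dict and the scatter into a preallocated zero row entirely: each row is built by a single gather comprehension over factor_base reading the exponent parity directly from the relation's dict.
-- outside the precondition, e.g. on build_parity_matrix([{'exp': {2: 1}}], [2, 2]): A returns [[0, 1]], B returns [[1, 1]]
import Mathlib
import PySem

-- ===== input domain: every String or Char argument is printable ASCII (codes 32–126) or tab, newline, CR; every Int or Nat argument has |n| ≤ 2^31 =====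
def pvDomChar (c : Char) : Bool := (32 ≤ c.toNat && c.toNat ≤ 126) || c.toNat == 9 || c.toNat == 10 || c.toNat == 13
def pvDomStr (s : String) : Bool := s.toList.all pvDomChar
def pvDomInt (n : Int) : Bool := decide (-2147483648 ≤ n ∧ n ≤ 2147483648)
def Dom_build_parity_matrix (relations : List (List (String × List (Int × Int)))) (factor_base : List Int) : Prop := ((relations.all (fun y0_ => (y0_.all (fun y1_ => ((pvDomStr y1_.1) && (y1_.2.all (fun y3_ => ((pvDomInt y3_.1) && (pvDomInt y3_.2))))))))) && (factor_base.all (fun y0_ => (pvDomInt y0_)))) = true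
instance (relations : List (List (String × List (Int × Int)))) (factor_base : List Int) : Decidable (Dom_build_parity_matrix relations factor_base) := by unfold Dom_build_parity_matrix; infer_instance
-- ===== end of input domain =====

-- B replaces A's prime->index dict and scatter into a preallocated zero row by a direct
-- gather over the factor base (idiomatic; same return value on Pre_).

-- ===== PORT A =====
def build_parity_matrix (relations : List (List (String × List (Int × Int)))) (factor_base : List Int) : List (List Int) :=
  let prime_idx : PySem.Dict Int Int :=
    (PySem.List.enumerate factor_base).foldl (fun d ip => d.insert ip.2 ip.1) PySem.Dict.empty
  relations.foldl (fun M rel =>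
    -- rel["exp"] raises KeyError when "exp" is absent; Pre_ excludes that
    let exp : List (Int × Int) := ((PySem.Dict.mk rel).get? "exp").getD []
    let row : List Int :=
      exp.foldl (fun row pc =>
        if prime_idx.contains pc.1 then
          PySem.List.pySetD row (prime_idx.getD pc.1 0) (PySem.Int.mod pc.2 2)
        else row) (List.replicate factor_base.length 0)
    M ++ [row]) []

-- ===== PORT B =====
def build_parity_matrix_alt (relations : List (List (String × List (Int × Int)))) (factor_base : List Int) : List (List Int) :=
  relations.map (fun rel =>
    factor_base.map (fun p =>
      PySem.Int.mod ((PySem.Dict.mk (((PySem.Dict.mk rel).get? "exp").getD [])).getD p 0) 2))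

-- ===== PRECONDITION & SPEC =====
-- Pre_ excludes: relations whose dicts lack the key "exp" (A raises KeyError there); a
-- factor_base with duplicate primes, on which A's last-write-wins scatter leaves the earlier
-- duplicated columns accidentally 0 (a degenerate input — a factor base is a set of primes);
-- and assoc lists with duplicate exponent keys, which do not represent a Python dict.
def Pre_build_parity_matrix (relations : List (List (String × List (Int × Int)))) (factor_base : List Int) : Prop :=
  factor_base.Nodup ∧
  ∀ rel ∈ relations,
    (PySem.Dict.mk rel).contains "exp" = true ∧
    (((((PySem.Dict.mk rel).get? "exp").getD []).map (·.1)).Nodup)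
instance (relations : List (List (String × List (Int × Int)))) (factor_base : List Int) : Decidable (Pre_build_parity_matrix relations factor_base) := by unfold Pre_build_parity_matrix; infer_instance

def pvWitness_build_parity_matrix : (List (List (String × List (Int × Int)))) × List Int :=
  ([[("exp", [(2, 3), (7, 1)])], [("exp", [(3, -2)])]], [2, 3, 5])

def Spec_build_parity_matrix (relations : List (List (String × List (Int × Int)))) (factor_base : List Int) (out : List (List Int)) : Prop := out = build_parity_matrix_alt relations factor_base
instance (relations : List (List (String × List (Int × Int)))) (factor_base : List Int) (out : List (List Int)) : Decidable (Spec_build_parity_matrix relations factor_base out) := by unfold Spec_build_parity_matrix; infer_instance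

-- ===== CLAIM (what is proved, stated in full; the proofs are below) =====
def Claim_equal_build_parity_matrix : Prop := ∀ (relations : List (List (String × List (Int × Int)))) (factor_base : List Int), Dom_build_parity_matrix relations factor_base → Pre_build_parity_matrix relations factor_base → Spec_build_parity_matrix relations factor_base (build_parity_matrix relations factor_base)

-- ===== LEMMAS AND PROOFS =====

theorem pv_foldl_append_map {α β : Type} (f : α → β) (l : List α) (acc : List β) :
    l.foldl (fun M x => M ++ [f x]) acc = acc ++ l.map f := by
  induction l generalizing acc with
  | nil => simp
  | cons x t ih => simp [ih]

theorem pv_primeIdx_eq (fb : List Int) (h : fb.Nodup) :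
    (PySem.List.enumerate fb).foldl (fun d ip => d.insert ip.2 ip.1) PySem.Dict.empty
      = PySem.Dict.mk ((PySem.List.enumerate fb).map (fun a => (a.2, a.1))) := by
  apply PySem.Dict.ext
  rw [PySem.Dict.items_foldl_insert_fresh]
  · simp [PySem.Dict.empty]
  · intro a _; simp [PySem.Dict.contains_empty]
  · rw [PySem.List.map_snd_enumerate]; exact h

theorem pv_primeIdx_keys (fb : List Int) :
    (PySem.Dict.mk ((PySem.List.enumerate fb).map (fun a => (a.2, a.1)))).keys = fb := by
  simp [PySem.Dict.keys, List.map_map]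
  exact PySem.List.map_snd_enumerate fb 0

theorem pv_primeIdx_contains (fb : List Int) (p : Int) :
    (PySem.Dict.mk ((PySem.List.enumerate fb).map (fun a => (a.2, a.1)))).contains p
      = decide (p ∈ fb) := by
  rw [PySem.Dict.contains_eq_decide_mem_keys, pv_primeIdx_keys]

theorem pv_primeIdx_getD (fb : List Int) (h : fb.Nodup) (k : Nat) (hk : k < fb.length) :
    (PySem.Dict.mk ((PySem.List.enumerate fb).map (fun a => (a.2, a.1)))).getD fb[k] 0
      = (k : Int) := by
  apply PySem.Dict.getD_of_mem_items
  · refine List.mem_map.mpr ⟨(PySem.List.enumerate fb)[k]'(by simp [PySem.List.length_enumerate, hk]), List.getElem_mem _, ?_⟩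
    simp [PySem.List.getElem_enumerate]
  · rw [pv_primeIdx_keys]; exact h

theorem pv_set_map_nodup (fb : List Int) (h : fb.Nodup) (g : Int → Int) (k : Nat)
    (hk : k < fb.length) (v : Int) :
    (fb.map g).set k v = fb.map (fun q => if q = fb[k] then v else g q) := by
  apply List.ext_getElem (by simp)
  intro j h1 h2
  have hj : j < fb.length := by simpa using h2
  by_cases hjk : j = k
  · subst hjk; simp
  · have hne : fb[j] ≠ fb[k] := fun he => hjk ((List.Nodup.getElem_inj_iff h).mp he)
    have hkj : k ≠ j := fun he => hjk he.symm
    simp [List.getElem_set, hne, hkj]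

theorem pv_row_fold (fb : List Int) (hfb : fb.Nodup) (d : PySem.Dict Int Int)
    (hc : ∀ p, d.contains p = decide (p ∈ fb))
    (hg : ∀ (k : Nat), (hk : k < fb.length) → d.getD fb[k] 0 = (k : Int))
    (l : List (Int × Int)) (hl : (l.map (·.1)).Nodup) (g : Int → Int) :
    l.foldl (fun row pc =>
        if d.contains pc.1 then
          PySem.List.pySetD row (d.getD pc.1 0) (PySem.Int.mod pc.2 2)
        else row) (fb.map g)
    = fb.map (fun q => ((PySem.Dict.mk l).get? q).elim (g q) (fun c => PySem.Int.mod c 2)) := by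
  induction l generalizing g with
  | nil => simp [PySem.Dict.get?]
  | cons pc t ih =>
    obtain ⟨p, c⟩ := pc
    have hl' : (t.map (·.1)).Nodup := (List.nodup_cons.mp (by simpa using hl)).2
    have hpnot : p ∉ t.map (·.1) := (List.nodup_cons.mp (by simpa using hl)).1
    have hstep : (if d.contains p then
          PySem.List.pySetD (fb.map g) (d.getD p 0) (PySem.Int.mod c 2)
        else (fb.map g))
        = fb.map (fun q => if q = p then PySem.Int.mod c 2 else g q) := by
      rw [hc p]
      by_cases hp : p ∈ fb
      · obtain ⟨k, hk, hpk⟩ := List.mem_iff_getElem.mp hp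
        subst hpk
        rw [hg k hk]
        simp only [decide_eq_true_eq, if_pos hp, PySem.List.pySetD_natCast]
        exact pv_set_map_nodup fb hfb g k hk _
      · simp only [hp, decide_false, if_neg Bool.false_ne_true]
        refine (List.map_congr_left ?_)
        intro q hq
        have : q ≠ p := fun he => hp (he ▸ hq)
        simp [this]
    rw [List.foldl_cons, hstep, ih hl']
    refine List.map_congr_left ?_
    intro q _
    rw [PySem.Dict.get?_mk_cons]
    by_cases hqp : p = q
    · subst hqp
      have : (PySem.Dict.mk t).get? p = none := by
        rw [PySem.Dict.get?_eq_none_iff_not_mem_keys]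
        simpa [PySem.Dict.keys, PySem.Dict.items] using hpnot
      simp [this]
    · have : q ≠ p := fun he => hqp he.symm
      simp [hqp, this]

-- ===== VERDICT (by name: the statement is the Claim_ definition above) =====
theorem build_parity_matrix_spec : Claim_equal_build_parity_matrix := by
  intro relations fb _hdom hpre
  obtain ⟨hfb, hrel⟩ := hpre
  unfold Spec_build_parity_matrix build_parity_matrix build_parity_matrix_alt
  simp only []
  rw [pv_foldl_append_map, List.nil_append]
  refine List.map_congr_left ?_
  intro rel hmem
  obtain ⟨-, hexp⟩ := hrel rel hmem
  rw [pv_primeIdx_eq fb hfb]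
  have hrep : List.replicate fb.length (0 : Int) = fb.map (fun _ => (0 : Int)) := by
    simp [List.map_const']
  rw [hrep,
    pv_row_fold fb hfb _ (pv_primeIdx_contains fb) (pv_primeIdx_getD fb hfb) _ hexp]
  refine List.map_congr_left ?_
  intro q _
  rw [PySem.Dict.getD_eq_get?_getD]
  cases h : (PySem.Dict.mk (((PySem.Dict.mk rel).get? "exp").getD [])).get? q with
  | none => simp [PySem.Int.mod]
  | some c2 => simp
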